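-- pv_equiv track=rewrite | github.com/Saketh-09/DumpyDataSeriesIndex | src/Utils/TimeSeriesUtil.py | bit_diff_num
-- ===== SOURCE A (Python) =====
-- def bit_diff_num(i, j, n):
--     different_bits = i ^ j
--     res = 0
--     for k in range(n):
--         if different_bits == 0:
--             break
--         tmp = different_bits >> 1
--         if tmp + tmp + 1 == different_bits:
--             res += 1
--         different_bits = tmp
--     return res
-- ===== SOURCE B (Python) =====
-- def bit_diff_num(i, j, n):
--     # popcount of the low n bits of i ^ j, without ever materialising 2**n:
--     # a nonnegative x is masked only when it is longer than n bits; for negative x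
--     # count the complement bits of ~x (>= 0) and take n minus that count.
--     if n <= 0:
--         return 0
--     x = i ^ j
--     if x >= 0:
--         if n < x.bit_length():
--             x &= (1 << n) - 1
--         return x.bit_count()
--     y = ~x
--     if n < y.bit_length():
--         y &= (1 << n) - 1
--     return n - y.bit_count()
-- ===== Notes on version B (the rewrite author's own statement) =====
-- stated objective: alternative
-- what changed: Instead of scanning the n bit positions of i^j one by one with shift/compare steps, B counts the set low bits directly with the built-in int.bit_count(), masking a nonnegative i^j only when it is longer than n bits and counting complement bits of ~(i^j) when i^j is negative, so no 2**n-sized integer is ever built.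
import Mathlib
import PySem

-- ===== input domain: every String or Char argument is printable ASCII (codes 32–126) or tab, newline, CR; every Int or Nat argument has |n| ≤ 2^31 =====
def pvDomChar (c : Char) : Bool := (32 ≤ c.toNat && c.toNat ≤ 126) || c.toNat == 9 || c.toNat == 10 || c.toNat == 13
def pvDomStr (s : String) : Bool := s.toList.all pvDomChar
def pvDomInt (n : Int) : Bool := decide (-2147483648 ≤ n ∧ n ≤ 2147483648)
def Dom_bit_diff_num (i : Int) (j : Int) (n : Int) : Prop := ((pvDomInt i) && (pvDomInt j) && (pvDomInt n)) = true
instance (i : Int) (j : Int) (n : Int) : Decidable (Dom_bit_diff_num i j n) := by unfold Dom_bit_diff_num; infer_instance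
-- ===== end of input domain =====

-- B replaces A's scan over all n bit positions by one reduction of i^j modulo 2^n
-- by the built-in popcount int.bit_count(), complementing via ~ when i^j < 0
-- so that no 2^n-sized integer is ever built (objective: alternative).

-- ===== PORT A =====
-- the 'for k in range(n)' loop with its 'break'; loop state = (different_bits, res)
def bitDiffLoopA : Nat → Int → Int → Int
  | 0, _, res => res
  | m + 1, db, res =>
    if db = 0 then res
    else
      let tmp := db >>> (1 : Nat)
      bitDiffLoopA m tmp (if tmp + tmp + 1 = db then res + 1 else res)

def bit_diff_num (i : Int) (j : Int) (n : Int) : Int :=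
  bitDiffLoopA n.toNat (PySem.Int.bxor i j) 0

-- ===== PORT B =====
-- Source B: mask a nonnegative x only when it is longer than n bits; for negative x
-- count the complement bits of ~x and return n minus that count.
-- '.bit_length()' is PySem.Int.bitLength, '.bit_count()' is PySem.Int.bitCount,
-- '~x' is Int.not x, '&' of nonnegative ints is PySem.Int.band.
def bit_diff_num_alt (i : Int) (j : Int) (n : Int) : Int :=
  if n ≤ 0 then 0
  else
    let x := PySem.Int.bxor i j
    if 0 ≤ x then
      let x' := if n < (PySem.Int.bitLength x : Int) then PySem.Int.band x ((1 : Int) <<< n.toNat - 1) else x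
      (PySem.Int.bitCount x' : Int)
    else
      let y := Int.not x
      let y' := if n < (PySem.Int.bitLength y : Int) then PySem.Int.band y ((1 : Int) <<< n.toNat - 1) else y
      n - (PySem.Int.bitCount y' : Int)

-- ===== PRECONDITION & SPEC =====
def Spec_bit_diff_num (i : Int) (j : Int) (n : Int) (out : Int) : Prop := out = bit_diff_num_alt i j n
instance (i : Int) (j : Int) (n : Int) (out : Int) : Decidable (Spec_bit_diff_num i j n out) := by unfold Spec_bit_diff_num; infer_instance

-- ===== CLAIM (what is proved, stated in full; the proofs are below) =====
def Claim_equal_bit_diff_num : Prop := ∀ (i : Int) (j : Int) (n : Int), Dom_bit_diff_num i j n → Spec_bit_diff_num i j n (bit_diff_num i j n)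

-- ===== LEMMAS AND PROOFS =====

-- popcount of the low m bits of an arbitrary integer (two's complement)
def popLow : Nat → Int → Int
  | 0, _ => 0
  | m + 1, x =>
    (if (x >>> (1 : Nat)) + (x >>> (1 : Nat)) + 1 = x then 1 else 0) + popLow m (x >>> (1 : Nat))

theorem shiftRight_one_int (x : Int) : x >>> (1 : Nat) = x / 2 := by
  have := Int.shiftRight_eq_div_pow x 1
  simpa using this

theorem popLow_zero (m : Nat) : popLow m 0 = 0 := by
  induction m with
  | zero => rfl
  | succ m ih => simp [popLow, ih]

theorem bitDiffLoopA_eq (m : Nat) : ∀ (x res : Int),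
    bitDiffLoopA m x res = res + popLow m x := by
  induction m with
  | zero => intro x res; simp [bitDiffLoopA, popLow]
  | succ m ih =>
    intro x res
    by_cases h : x = 0
    · simp [bitDiffLoopA, h, popLow_zero]
    · simp only [bitDiffLoopA, h, ih, popLow]
      split_ifs <;> try contradiction
      all_goals ring

theorem popLow_eq (m : Nat) : ∀ x : Int,
    popLow m x = (PySem.Int.bitCount (PySem.Int.mod x (2 ^ m)) : Int) := by
  induction m with
  | zero =>
    intro x
    rw [PySem.Int.mod_eq_emod_of_pos (by norm_num)]
    simp [popLow]
  | succ m ih =>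
    intro x
    have hP : (0 : Int) < 2 ^ m := by positivity
    have hP2 : (0 : Int) < 2 ^ (m + 1) := by positivity
    set y := PySem.Int.mod x (2 ^ (m + 1)) with hy
    have hye : y = x % 2 ^ (m + 1) := by rw [hy, PySem.Int.mod_eq_emod_of_pos hP2]
    have hy0 : 0 ≤ y := by rw [hye]; exact Int.emod_nonneg x (by positivity)
    have hy1 : y < 2 ^ m * 2 := by
      rw [hye]
      have := Int.emod_lt_of_pos x hP2
      rw [pow_succ] at this
      exact this
    have hq : PySem.Int.floordiv x (2 ^ (m + 1)) * 2 ^ (m + 1) + y = x :=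
      PySem.Int.floordiv_mul_add_mod x _
    set q := PySem.Int.floordiv x (2 ^ (m + 1)) with hqdef
    have hx2 : x / 2 = y / 2 + 2 ^ m * q := by
      have hx : x = y + (2 ^ m * q) * 2 := by rw [← hq, pow_succ]; ring
      rw [hx, Int.add_mul_ediv_right _ _ (by norm_num)]
    have hF2 : PySem.Int.mod (x / 2) (2 ^ m) = y / 2 := by
      rw [PySem.Int.mod_eq_emod_of_pos hP, hx2, Int.add_mul_emod_self_left]
      exact Int.emod_eq_of_lt (Int.ediv_nonneg hy0 (by norm_num)) (by omega)
    have hF1 : x % 2 = y % 2 := by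
      rw [hye, Int.emod_emod_of_dvd x ⟨2 ^ m, by rw [pow_succ]; ring⟩]
    have hs : x >>> (1 : Nat) = x / 2 := shiftRight_one_int x
    rcases eq_or_lt_of_le hy0 with h0 | hpos
    · -- y = 0 : the low m+1 bits of x are all zero
      have h0' : y = 0 := h0.symm
      have hxe : x % 2 = 0 := by omega
      have hcond : ¬ ((x >>> (1 : Nat)) + (x >>> (1 : Nat)) + 1 = x) := by rw [hs]; omega
      have hzero : PySem.Int.mod (x >>> (1 : Nat)) (2 ^ m) = 0 := by
        rw [hs, hF2, h0']
        norm_num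
      simp only [popLow, hcond, ih, hzero, h0']
      norm_num
    · -- y > 0
      have hbc : PySem.Int.bitCount y =
          (PySem.Int.mod y 2).toNat + PySem.Int.bitCount (PySem.Int.floordiv y 2) :=
        PySem.Int.bitCount_of_pos hpos
      rw [PySem.Int.mod_eq_emod_of_pos (by norm_num), PySem.Int.floordiv_eq_ediv_of_pos (by norm_num)] at hbc
      simp only [popLow, ih, hs, hF2, hbc]
      have hy2 : 0 ≤ y % 2 ∧ y % 2 < 2 := ⟨Int.emod_nonneg y (by norm_num), Int.emod_lt_of_pos y (by norm_num)⟩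
      split_ifs with hc
      · have : x % 2 = 1 := by omega
        push_cast
        omega
      · have : x % 2 = 0 := by omega
        push_cast
        omega

theorem int_not_eq (x : Int) : Int.not x = -x - 1 := by
  cases x with
  | ofNat m => show Int.negSucc m = _; simp [Int.negSucc_eq]; ring
  | negSucc m => show Int.ofNat m = _; simp [Int.negSucc_eq]

-- the if-guarded mask of Source B computes exactly the low n bits of a nonnegative z
theorem trunc_eq_mod (z : Int) (hz : 0 ≤ z) (n : Int) (hn : 0 < n) :
    (if n < (PySem.Int.bitLength z : Int) then PySem.Int.band z ((1 : Int) <<< n.toNat - 1) else z)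
      = PySem.Int.mod z (2 ^ n.toNat) := by
  have hP : (0 : Int) < 2 ^ n.toNat := by positivity
  have hsh : ((1 : Int) <<< n.toNat) = 2 ^ n.toNat := by simp [Int.shiftLeft_eq]
  rw [PySem.Int.mod_eq_emod_of_pos hP]
  split_ifs with h
  · rw [hsh, PySem.Int.band_of_nonneg hz (by omega)]
    have h1 : ((2 ^ n.toNat - 1 : Int)).toNat = 2 ^ n.toNat - 1 := by
      have : ((2 ^ n.toNat : Nat) : Int) = 2 ^ n.toNat := by push_cast; ring
      omega
    rw [h1, Nat.and_two_pow_sub_one_eq_mod]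
    have hzz : z = ((z.toNat : Nat) : Int) := (Int.toNat_of_nonneg hz).symm
    rw [hzz]
    push_cast
    rfl
  · have hbl : PySem.Int.bitLength z ≤ n.toNat := by omega
    have habs := PySem.Int.lt_two_pow_bitLength z
    have hlt : z < 2 ^ n.toNat := by
      have h2 : (2:Nat) ^ PySem.Int.bitLength z ≤ 2 ^ n.toNat := Nat.pow_le_pow_right (by norm_num) hbl
      have h3 : z.natAbs < 2 ^ n.toNat := lt_of_lt_of_le habs h2
      have h4 : ((2 ^ n.toNat : Nat) : Int) = 2 ^ n.toNat := by push_cast; ring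
      omega
    exact (Int.emod_eq_of_lt hz hlt).symm

theorem bc_step (r : Nat) :
    PySem.Int.bitCount (r : Int) = r % 2 + PySem.Int.bitCount ((r / 2 : Nat) : Int) := by
  rcases Nat.eq_zero_or_pos r with h | h
  · subst h; norm_num
  · exact PySem.Int.bitCount_natCast h

-- bit counts of two naturals summing (carry-free) to the all-ones pattern 2^k - 1
theorem compN : ∀ (k : Nat) (r s : Nat), r + s = 2 ^ k - 1 →
    PySem.Int.bitCount (r : Int) + PySem.Int.bitCount (s : Int) = k := by
  intro k
  induction k with
  | zero =>
    intro r s h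
    have hr : r = 0 := by omega
    have hs : s = 0 := by omega
    subst hr; subst hs; norm_num
  | succ k ih =>
    intro r s h
    have hp : (2:Nat) ^ (k + 1) = 2 * 2 ^ k := by ring
    have hpos : (1:Nat) ≤ 2 ^ k := Nat.one_le_two_pow
    have h1 : r / 2 + s / 2 = 2 ^ k - 1 := by omega
    have h2 : r % 2 + s % 2 = 1 := by omega
    have := ih (r / 2) (s / 2) h1
    rw [bc_step r, bc_step s]
    omega

-- the low k bits of ~x are the complement of the low k bits of x
theorem mod_not (x : Int) (k : Nat) :
    PySem.Int.mod (Int.not x) (2 ^ k) = 2 ^ k - 1 - PySem.Int.mod x (2 ^ k) := by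
  have hM : (0 : Int) < 2 ^ k := by positivity
  rw [PySem.Int.mod_eq_emod_of_pos hM, PySem.Int.mod_eq_emod_of_pos hM, int_not_eq]
  have hr0 : 0 ≤ x % 2 ^ k := Int.emod_nonneg x (by positivity)
  have hr1 : x % 2 ^ k < 2 ^ k := Int.emod_lt_of_pos x hM
  have hkey : (-x - 1) % 2 ^ k = (2 ^ k - 1 - x % 2 ^ k) % 2 ^ k := by
    rw [Int.emod_eq_emod_iff_emod_sub_eq_zero]
    have hx : x % 2 ^ k = x - 2 ^ k * (x / 2 ^ k) := Int.emod_def x (2 ^ k)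
    have hd : (-x - 1) - (2 ^ k - 1 - x % 2 ^ k) = 2 ^ k * (-(x / 2 ^ k) - 1) := by
      rw [hx]; ring
    rw [hd]
    exact Int.mul_emod_right _ _
  rw [hkey, Int.emod_eq_of_lt (by omega) (by omega)]

-- ===== VERDICT (by name: the statement is the Claim_ definition above) =====
theorem bit_diff_num_spec : Claim_equal_bit_diff_num := by
  intro i j n _
  unfold Spec_bit_diff_num bit_diff_num bit_diff_num_alt
  by_cases hn : n ≤ 0
  · rw [Int.toNat_of_nonpos hn]
    simp [bitDiffLoopA, hn]
  · rw [if_neg hn, bitDiffLoopA_eq, popLow_eq, zero_add]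
    have hn' : 0 < n := by omega
    have hk : (n.toNat : Int) = n := Int.toNat_of_nonneg hn'.le
    set X := PySem.Int.bxor i j with hX
    by_cases hx : 0 ≤ X
    · simp only [if_pos hx, trunc_eq_mod X hx n hn']
    · simp only [if_neg hx]
      have hy : 0 ≤ Int.not X := by rw [int_not_eq]; omega
      rw [trunc_eq_mod _ hy n hn', mod_not]
      have hM : (0 : Int) < 2 ^ n.toNat := by positivity
      have hr0 : 0 ≤ PySem.Int.mod X (2 ^ n.toNat) := by
        rw [PySem.Int.mod_eq_emod_of_pos hM]; exact Int.emod_nonneg X (by positivity)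
      have hr1 : PySem.Int.mod X (2 ^ n.toNat) < 2 ^ n.toNat := by
        rw [PySem.Int.mod_eq_emod_of_pos hM]; exact Int.emod_lt_of_pos X hM
      set r := PySem.Int.mod X (2 ^ n.toNat) with hrdef
      have hcast : ((2 ^ n.toNat : Nat) : Int) = 2 ^ n.toNat := by push_cast; ring
      have hsum : r.toNat + (2 ^ n.toNat - 1 - r).toNat = 2 ^ n.toNat - 1 := by omega
      have hcomp := compN n.toNat r.toNat (2 ^ n.toNat - 1 - r).toNat hsum
      rw [Int.toNat_of_nonneg hr0] at hcomp
      rw [show (((2 ^ n.toNat - 1 - r).toNat : Nat) : Int) = 2 ^ n.toNat - 1 - r by omega] at hcomp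
      omega
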